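-- pv_equiv track=rewrite | github.com/stirfrypapi/coding_challenges | coding_challenges/gusto_round_1.py | usernamesSystem
-- ===== SOURCE A (Python) =====
-- def usernamesSystem(u):
--     usernames = set()
--     return_usernames = []
--
--     for username in u:
--         if username not in usernames:
--             usernames.add(username)
--             return_usernames.append(username)
--         elif username in usernames:
--             og = username
--             count = 1
--             username += str(count)
--             while username in usernames:
--                 count += 1
--                 username = og + str(count)
--             usernames.add(username)
--             return_usernames.append(username)
--
--     return return_usernames
-- ===== SOURCE B (Python) =====
-- def usernamesSystem(u):
--     last = {}  # key present = name taken; value = last numeric suffix handed out for that base (0 = none yet)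
--     def resolve(name):
--         if name not in last:
--             last[name] = 0
--             return name
--         c = last[name] + 1
--         while name + str(c) in last:
--             c += 1
--         last[name] = c
--         cand = name + str(c)
--         last[cand] = 0
--         return cand
--     return [resolve(name) for name in u]
-- ===== Notes on version B (the rewrite author's own statement) =====
-- stated objective: faster
-- what changed: B replaces A's set plus restart-at-1 scan by a single dict whose keys are the taken names and whose value is the last suffix handed out per base, resuming the suffix search there; the output is produced by mapping a resolve helper over the input instead of threading an accumulator list.
import Mathlib
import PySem

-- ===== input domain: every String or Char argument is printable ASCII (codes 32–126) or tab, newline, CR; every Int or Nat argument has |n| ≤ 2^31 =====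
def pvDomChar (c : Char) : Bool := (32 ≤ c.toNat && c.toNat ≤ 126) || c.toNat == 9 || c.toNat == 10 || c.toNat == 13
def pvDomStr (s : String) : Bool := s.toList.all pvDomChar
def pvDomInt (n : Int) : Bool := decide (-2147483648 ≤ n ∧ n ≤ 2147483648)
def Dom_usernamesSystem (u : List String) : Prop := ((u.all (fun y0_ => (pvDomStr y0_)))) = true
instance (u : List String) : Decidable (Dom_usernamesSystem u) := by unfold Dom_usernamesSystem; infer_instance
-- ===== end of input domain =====

-- B keeps one dict (key = taken name, value = last suffix per base) and resumes the suffix search there instead of A's set plus restart-at-1 scan; same output list proved.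


-- ===== PORT A =====
-- og + str(count)
def pvCand (base : String) (c : Nat) : String := base ++ PySem.Int.toStr (c : Int)

-- A's while loop: 'while og+str(count) in usernames: count += 1'; fuel is a totality guard
-- only (usernames.length + 1 iterations always suffice, proved below); returns the final count.
def pvScan (taken : PySem.Set String) (base : String) (c : Nat) : Nat → Nat
  | 0 => c
  | fuel + 1 =>
    if PySem.Set.contains taken (pvCand base c) then pvScan taken base (c + 1) fuel else c

-- one iteration of A's for-loop; state = (usernames, return_usernames)
def pvStepA (st : PySem.Set String × List String) (username : String) :
    PySem.Set String × List String :=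
  if PySem.Set.contains st.1 username = false then
    (PySem.Set.add st.1 username, st.2 ++ [username])
  else
    -- og = username; count = 1; while og+str(count) in usernames: count += 1
    let count := pvScan st.1 username 1 (st.1.length + 1)
    (PySem.Set.add st.1 (pvCand username count), st.2 ++ [pvCand username count])

def usernamesSystem (u : List String) : List String :=
  (u.foldl pvStepA (PySem.Set.empty, [])).2

-- ===== PORT B =====
-- B's while loop: 'while name+str(c) in last: c += 1' — membership is a KEY test in the
-- single dict; fuel = last.size + 1 is a totality guard only (always sufficient, proved below).
def pvScanB (last : PySem.Dict String Nat) (base : String) (c : Nat) : Nat → Nat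
  | 0 => c
  | fuel + 1 =>
    if PySem.Dict.contains last (pvCand base c) then pvScanB last base (c + 1) fuel else c

-- resolve(name) of Source B: returns the chosen name together with the updated dict
def pvResolve (last : PySem.Dict String Nat) (name : String) :
    String × PySem.Dict String Nat :=
  match PySem.Dict.get? last name with
  | none => (name, PySem.Dict.insert last name 0)
  | some c0 =>
    let c := pvScanB last name (c0 + 1) (PySem.Dict.size last + 1)
    (pvCand name c,
      PySem.Dict.insert (PySem.Dict.insert last name c) (pvCand name c) 0)

-- the comprehension '[resolve(name) for name in u]', threading the dict
def pvMapResolve (last : PySem.Dict String Nat) : List String → List String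
  | [] => []
  | name :: rest =>
    let r := pvResolve last name
    r.1 :: pvMapResolve r.2 rest

def usernamesSystem_alt (u : List String) : List String :=
  pvMapResolve PySem.Dict.empty u

-- ===== PRECONDITION & SPEC =====
def Spec_usernamesSystem (u : List String) (out : List String) : Prop := out = usernamesSystem_alt u
instance (u : List String) (out : List String) : Decidable (Spec_usernamesSystem u out) := by unfold Spec_usernamesSystem; infer_instance

-- ===== CLAIM (what is proved, stated in full; the proofs are below) =====
def Claim_equal_usernamesSystem : Prop := ∀ (u : List String), Dom_usernamesSystem u → Spec_usernamesSystem u (usernamesSystem u)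

-- ===== LEMMAS AND PROOFS =====

-- decimal decoding, used only to prove that c ↦ base+str(c) is injective
def pvVal (ch : Char) : Nat := ch.toNat - 48
def pvDec (l : List Char) : Nat := l.foldl (fun a ch => a * 10 + pvVal ch) 0

lemma pvToDigitsCore_append (f n : Nat) (ds : List Char) :
    Nat.toDigitsCore 10 f n ds = Nat.toDigitsCore 10 f n [] ++ ds := by
  induction f generalizing n ds with
  | zero => simp [Nat.toDigitsCore]
  | succ f ih =>
    rw [Nat.toDigitsCore, Nat.toDigitsCore]
    by_cases h : n / 10 = 0
    · simp [h]
    · simp only [h, if_false]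
      rw [ih (n / 10) (Nat.digitChar (n % 10) :: ds), ih (n / 10) [Nat.digitChar (n % 10)]]
      simp

lemma pvVal_digitChar (k : Nat) (h : k < 10) : pvVal (Nat.digitChar k) = k := by
  interval_cases k <;> decide

lemma pvDec_append_singleton (l : List Char) (ch : Char) :
    pvDec (l ++ [ch]) = pvDec l * 10 + pvVal ch := by
  simp [pvDec, List.foldl_append]

lemma pvDec_toDigitsCore (f : Nat) : ∀ n : Nat, n < 10 ^ f →
    pvDec (Nat.toDigitsCore 10 f n []) = n := by
  induction f with
  | zero => intro n hn; interval_cases n; decide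
  | succ f ih =>
    intro n hn
    rw [Nat.toDigitsCore]
    by_cases h : n / 10 = 0
    · have hn10 : n < 10 := by omega
      simp only [h, if_pos]
      have : pvDec [Nat.digitChar (n % 10)] = pvVal (Nat.digitChar (n % 10)) := by
        simp [pvDec, pvVal]
      rw [this, pvVal_digitChar _ (by omega)]
      omega
    · simp only [h, if_false]
      rw [pvToDigitsCore_append, pvDec_append_singleton,
        ih (n / 10) (by rw [pow_succ] at hn; omega), pvVal_digitChar _ (by omega)]
      omega

lemma pvDec_toStr (n : Nat) : pvDec (PySem.Int.toStr (n : Int)).toList = n := by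
  rw [PySem.Int.toList_toStr]
  have hneg : ¬ ((n : Int) < 0) := by omega
  simp only [PySem.Int.toChars, hneg, if_false, Int.toNat_natCast]
  show pvDec (Nat.toDigitsCore 10 (n + 1) n []) = n
  refine pvDec_toDigitsCore (n + 1) n ?_
  calc n < 2 ^ n := Nat.lt_two_pow_self
    _ ≤ 10 ^ n := Nat.pow_le_pow_left (by omega) n
    _ ≤ 10 ^ (n + 1) := Nat.pow_le_pow_right (by omega) (by omega)

lemma pvCand_inj (base : String) {a b : Nat} (h : pvCand base a = pvCand base b) : a = b := by
  unfold pvCand at h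
  have h2 := congrArg String.toList h
  rw [String.toList_append, String.toList_append] at h2
  have h3 := List.append_cancel_left h2
  have := congrArg pvDec h3
  rwa [pvDec_toStr, pvDec_toStr] at this

-- within taken.length + 1 candidates starting at c there is always one not in the set
lemma pvFree_exists (taken : PySem.Set String) (base : String) (c : Nat) :
    ∃ j, c ≤ j ∧ j ≤ c + taken.length ∧ pvCand base j ∉ taken := by
  by_contra hall
  push Not at hall
  have hsub : ((List.range (taken.length + 1)).map (fun k => pvCand base (c + k))) ⊆ taken := by
    intro x hx
    simp only [List.mem_map, List.mem_range] at hx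
    obtain ⟨k, hk, rfl⟩ := hx
    exact hall _ (by omega) (by omega)
  have hnd : ((List.range (taken.length + 1)).map (fun k => pvCand base (c + k))).Nodup := by
    refine List.Nodup.map ?_ (List.nodup_range)
    intro x y hxy
    have := pvCand_inj base hxy
    omega
  have := (List.subperm_of_subset hnd hsub).length_le
  simp at this

-- within last.size + 1 candidates starting at c there is always one that is not a key
lemma pvFreeB_exists (last : PySem.Dict String Nat) (base : String) (c : Nat) :
    ∃ j, c ≤ j ∧ j ≤ c + PySem.Dict.size last ∧
      PySem.Dict.contains last (pvCand base j) = false := by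
  by_contra hall
  push Not at hall
  have hsub : ((List.range (PySem.Dict.size last + 1)).map (fun k => pvCand base (c + k))) ⊆
      PySem.Dict.keys last := by
    intro x hx
    simp only [List.mem_map, List.mem_range] at hx
    obtain ⟨k, hk, rfl⟩ := hx
    have hc : PySem.Dict.contains last (pvCand base (c + k)) = true := by
      have := hall (c + k) (by omega) (by omega)
      simp at this
      exact this
    exact (PySem.Dict.contains_iff_mem_keys _ _).mp hc
  have hnd : ((List.range (PySem.Dict.size last + 1)).map (fun k => pvCand base (c + k))).Nodup := by
    refine List.Nodup.map ?_ (List.nodup_range)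
    intro x y hxy
    have := pvCand_inj base hxy
    omega
  have hlen := (List.subperm_of_subset hnd hsub).length_le
  have hkeys : (PySem.Dict.keys last).length = PySem.Dict.size last := by
    simp [PySem.Dict.keys, PySem.Dict.size]
  rw [hkeys] at hlen
  simp at hlen

-- pvScan computes the least index ≥ c not in the set (when such an index lies inside the fuel window)
lemma pvScan_spec (taken : PySem.Set String) (base : String) :
    ∀ (fuel c : Nat), (∃ j, c ≤ j ∧ j < c + fuel ∧ pvCand base j ∉ taken) →
    c ≤ pvScan taken base c fuel ∧ pvCand base (pvScan taken base c fuel) ∉ taken ∧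
      ∀ j, c ≤ j → j < pvScan taken base c fuel → pvCand base j ∈ taken := by
  intro fuel
  induction fuel with
  | zero => intro c ⟨j, h1, h2, _⟩; omega
  | succ f ih =>
    intro c ⟨j, h1, h2, h3⟩
    by_cases hm : pvCand base c ∈ taken
    · have hscan : pvScan taken base c (f + 1) = pvScan taken base (c + 1) f := by
        simp [pvScan, hm]
      have hj : c + 1 ≤ j := by
        rcases Nat.eq_or_lt_of_le h1 with h | h
        · exact absurd hm (h ▸ h3)
        · omega
      obtain ⟨g1, g2, g3⟩ := ih (c + 1) ⟨j, hj, by omega, h3⟩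
      rw [hscan]
      refine ⟨by omega, g2, ?_⟩
      intro i hi1 hi2
      rcases Nat.eq_or_lt_of_le hi1 with h | h
      · exact h ▸ hm
      · exact g3 i (by omega) hi2
    · have hscan : pvScan taken base c (f + 1) = c := by simp [pvScan, hm]
      rw [hscan]
      exact ⟨le_refl c, hm, fun i hi1 hi2 => by omega⟩

-- pvScanB computes the least index ≥ c whose candidate is not a key of the dict
lemma pvScanB_spec (last : PySem.Dict String Nat) (base : String) :
    ∀ (fuel c : Nat),
    (∃ j, c ≤ j ∧ j < c + fuel ∧ PySem.Dict.contains last (pvCand base j) = false) →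
    c ≤ pvScanB last base c fuel ∧
      PySem.Dict.contains last (pvCand base (pvScanB last base c fuel)) = false ∧
      ∀ j, c ≤ j → j < pvScanB last base c fuel →
        PySem.Dict.contains last (pvCand base j) = true := by
  intro fuel
  induction fuel with
  | zero => intro c ⟨j, h1, h2, _⟩; omega
  | succ f ih =>
    intro c ⟨j, h1, h2, h3⟩
    by_cases hm : PySem.Dict.contains last (pvCand base c) = true
    · have hscan : pvScanB last base c (f + 1) = pvScanB last base (c + 1) f := by
        simp [pvScanB, hm]
      have hj : c + 1 ≤ j := by
        rcases Nat.eq_or_lt_of_le h1 with h | h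
        · rw [← h] at h3; rw [hm] at h3; cases h3
        · omega
      obtain ⟨g1, g2, g3⟩ := ih (c + 1) ⟨j, hj, by omega, h3⟩
      rw [hscan]
      refine ⟨by omega, g2, ?_⟩
      intro i hi1 hi2
      rcases Nat.eq_or_lt_of_le hi1 with h | h
      · exact h ▸ hm
      · exact g3 i (by omega) hi2
    · have hm' : PySem.Dict.contains last (pvCand base c) = false := by
        cases h : PySem.Dict.contains last (pvCand base c)
        · rfl
        · exact absurd h hm
      have hscan : pvScanB last base c (f + 1) = c := by simp [pvScanB, hm']
      rw [hscan]
      exact ⟨le_refl c, hm', fun i hi1 hi2 => by omega⟩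

-- the correspondence between A's set and B's dict keys
def pvCorr (s : PySem.Set String) (d : PySem.Dict String Nat) : Prop :=
  ∀ x : String, x ∈ s ↔ PySem.Dict.contains d x = true

-- the resume invariant: the value stored for a base says all suffixes up to it are taken
def pvInv (d : PySem.Dict String Nat) : Prop :=
  ∀ base c0, PySem.Dict.get? d base = some c0 →
    ∀ j, 1 ≤ j → j ≤ c0 → PySem.Dict.contains d (pvCand base j) = true

-- under the correspondence and the invariant, A's restart-at-1 scan and B's resumed scan agree
lemma pvScan_agree (s : PySem.Set String) (d : PySem.Dict String Nat) (base : String)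
    (c0 : Nat) (hcorr : pvCorr s d)
    (hinv : ∀ j, 1 ≤ j → j ≤ c0 → PySem.Dict.contains d (pvCand base j) = true) :
    pvScan s base 1 (s.length + 1) = pvScanB d base (c0 + 1) (PySem.Dict.size d + 1) := by
  obtain ⟨j1, hj1a, hj1b, hj1c⟩ := pvFree_exists s base 1
  obtain ⟨j2, hj2a, hj2b, hj2c⟩ := pvFreeB_exists d base (c0 + 1)
  obtain ⟨a1, a2, a3⟩ := pvScan_spec s base (s.length + 1) 1 ⟨j1, hj1a, by omega, hj1c⟩
  obtain ⟨b1, b2, b3⟩ :=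
    pvScanB_spec d base (PySem.Dict.size d + 1) (c0 + 1) ⟨j2, hj2a, by omega, hj2c⟩
  set r1 := pvScan s base 1 (s.length + 1) with hr1
  set r2 := pvScanB d base (c0 + 1) (PySem.Dict.size d + 1) with hr2
  rcases lt_trichotomy r1 r2 with h | h | h
  · have hge : c0 + 1 ≤ r1 := by
      by_contra hlt
      exact a2 ((hcorr _).mpr (hinv r1 a1 (by omega)))
    have := b3 r1 hge h
    exact absurd ((hcorr _).mpr this) a2
  · exact h
  · have := a3 r2 (by omega) h
    rw [(hcorr _).mp this] at b2
    cases b2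

-- membership in the dict is monotone under insert
lemma pvContains_insert_mono (d : PySem.Dict String Nat) (k : String) (v : Nat) (x : String)
    (h : PySem.Dict.contains d x = true) :
    PySem.Dict.contains (PySem.Dict.insert d k v) x = true := by
  rw [PySem.Dict.contains_insert]
  simp [h]

-- the main simulation: A's foldl over (set, output) appends exactly B's mapped output
lemma pvLoop (u : List String) : ∀ (s : PySem.Set String) (d : PySem.Dict String Nat)
    (out : List String), pvCorr s d → pvInv d →
    (u.foldl pvStepA (s, out)).2 = out ++ pvMapResolve d u := by
  induction u with
  | nil => intro s d out _ _; simp [pvMapResolve]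
  | cons x xs ih =>
    intro s d out hcorr hinv
    simp only [List.foldl_cons]
    rcases hget : PySem.Dict.get? d x with _ | c0
    · -- fresh name: not a key of d, hence (hcorr) not in s
      have hcont : PySem.Dict.contains d x = false := by
        rw [PySem.Dict.contains_eq_isSome_get?, hget]; rfl
      have hmem : x ∉ s := fun hx => by rw [(hcorr x).mp hx] at hcont; cases hcont
      have hA : pvStepA (s, out) x = (PySem.Set.add s x, out ++ [x]) := by
        simp [pvStepA, hmem]
      have hB : pvMapResolve d (x :: xs) =
          x :: pvMapResolve (PySem.Dict.insert d x 0) xs := by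
        simp [pvMapResolve, pvResolve, hget]
      rw [hA, hB, ih (PySem.Set.add s x) (PySem.Dict.insert d x 0) (out ++ [x]) ?_ ?_]
      · simp
      · -- correspondence after the fresh insert
        intro y
        rw [PySem.Set.mem_add, PySem.Dict.contains_insert]
        constructor
        · rintro (hy | rfl)
          · simp [(hcorr y).mp hy]
          · simp
        · intro hy
          rcases Bool.or_eq_true_iff.mp hy with hy | hy
          · exact Or.inr (by simpa using hy)
          · exact Or.inl ((hcorr y).mpr hy)
      · -- invariant after the fresh insert (value 0: vacuous for x, monotone otherwise)
        intro base c hbc j hj1 hj2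
        by_cases hbx : base = x
        · subst hbx
          rw [PySem.Dict.get?_insert_self] at hbc
          cases hbc
          omega
        · rw [PySem.Dict.get?_insert_of_ne _ _ hbx] at hbc
          exact pvContains_insert_mono _ _ _ _ (hinv base c hbc j hj1 hj2)
    · -- duplicate: x is a key of d, hence (hcorr) in s; the two scans return the same count
      have hcont : PySem.Dict.contains d x = true := by
        rw [PySem.Dict.contains_eq_isSome_get?, hget]; rfl
      have hmem : x ∈ s := (hcorr x).mpr hcont
      have hagree := pvScan_agree s d x c0 hcorr (fun j h1 h2 => hinv x c0 hget j h1 h2)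
      set c := pvScanB d x (c0 + 1) (PySem.Dict.size d + 1) with hc
      have hA : pvStepA (s, out) x =
          (PySem.Set.add s (pvCand x c), out ++ [pvCand x c]) := by
        simp [pvStepA, hmem, hagree]
      have hB : pvMapResolve d (x :: xs) = pvCand x c ::
          pvMapResolve (PySem.Dict.insert (PySem.Dict.insert d x c) (pvCand x c) 0) xs := by
        simp only [pvMapResolve, pvResolve, hget]
        simp only [← hc]
      obtain ⟨j2, hj2a, hj2b, hj2c⟩ := pvFreeB_exists d x (c0 + 1)
      obtain ⟨b1, b2, b3⟩ :=
        pvScanB_spec d x (PySem.Dict.size d + 1) (c0 + 1) ⟨j2, hj2a, by omega, hj2c⟩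
      rw [hA, hB, ih (PySem.Set.add s (pvCand x c))
        (PySem.Dict.insert (PySem.Dict.insert d x c) (pvCand x c) 0)
        (out ++ [pvCand x c]) ?_ ?_]
      · simp
      · -- correspondence after adding the same chosen name on both sides
        intro y
        rw [PySem.Set.mem_add, PySem.Dict.contains_insert, PySem.Dict.contains_insert]
        constructor
        · rintro (hy | rfl)
          · simp [(hcorr y).mp hy]
          · simp
        · intro hy
          rcases Bool.or_eq_true_iff.mp hy with hy | hy
          · exact Or.inr (by simpa using hy)
          · rcases Bool.or_eq_true_iff.mp hy with hy | hy
            · have : y = x := by simpa using hy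
              exact Or.inl (this ▸ hmem)
            · exact Or.inl ((hcorr y).mpr hy)
      · -- invariant after recording suffix c for x and taking the candidate
        intro base cb hbc j hj1 hj2
        by_cases hbcand : base = pvCand x c
        · subst hbcand
          rw [PySem.Dict.get?_insert_self] at hbc
          cases hbc
          omega
        · rw [PySem.Dict.get?_insert_of_ne _ _ hbcand] at hbc
          by_cases hbx : base = x
          · subst hbx
            rw [PySem.Dict.get?_insert_self] at hbc
            have hcb : c = cb := by injection hbc
            subst hcb
            rcases Nat.lt_or_ge j (c0 + 1) with h | h
            · exact pvContains_insert_mono _ _ _ _ (pvContains_insert_mono _ _ _ _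
                (hinv base c0 hget j hj1 (by omega)))
            · rcases Nat.eq_or_lt_of_le hj2 with h' | h'
              · rw [h']
                exact PySem.Dict.contains_insert_self _ _ _
              · exact pvContains_insert_mono _ _ _ _ (pvContains_insert_mono _ _ _ _
                  (b3 j h h'))
          · rw [PySem.Dict.get?_insert_of_ne _ _ hbx] at hbc
            exact pvContains_insert_mono _ _ _ _ (pvContains_insert_mono _ _ _ _
              (hinv base cb hbc j hj1 hj2))

-- ===== VERDICT (by name: the statement is the Claim_ definition above) =====
theorem usernamesSystem_spec : Claim_equal_usernamesSystem := by
  intro u _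
  show usernamesSystem u = usernamesSystem_alt u
  unfold usernamesSystem usernamesSystem_alt
  rw [pvLoop u PySem.Set.empty PySem.Dict.empty [] ?_ ?_]
  · simp
  · intro x
    constructor
    · intro hx; cases hx
    · intro hx; rw [PySem.Dict.contains_empty] at hx; cases hx
  · intro base c0 hbc
    rw [PySem.Dict.get?_empty] at hbc; cases hbc
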